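-- pv_equiv track=rewrite | github.com/Clavier-Zhang/pinao-sheet-auto-highlighter | src/tools.py | remove_vertical_close_point
-- ===== SOURCE A (Python) =====
-- def remove_vertical_close_point(points, range):
--     results = []
--     for point in points:
--         keep = True
--         for result in results:
--             if abs(point[1]-result[1]) < range:
--                 keep = False
--         if keep:
--             results.append(point)
--     return results
-- ===== SOURCE B (Python) =====
-- def _bisect_left(a, x):
--     lo, hi = 0, len(a)
--     while lo < hi:
--         mid = (lo + hi) // 2
--         if a[mid] < x:
--             lo = mid + 1
--         else:
--             hi = mid
--     return lo
--
--
-- def remove_vertical_close_point(points, range):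
--     results = []
--     ys = []  # sorted list of kept y-values
--     for point in points:
--         y = point[1]
--         i = _bisect_left(ys, y)
--         close = (i > 0 and y - ys[i - 1] < range) or (i < len(ys) and ys[i] - y < range)
--         if not close:
--             results.append(point)
--             ys.insert(i, y)
--     return results
-- ===== Notes on version B (the rewrite author's own statement) =====
-- stated objective: alternative
-- what changed: Replaces A's rescan of all kept points per candidate with a sorted list of kept y-values maintained by binary-search insertion, so each candidate is checked against only its two nearest kept neighbours; it trades A's inner scan for bisect bookkeeping (asymptotically fewer comparisons when many points are kept, but not measurably faster on the benchmark family).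
-- outside the precondition, e.g. on remove_vertical_close_point([[1]], 5): A returns [[1]], B raises IndexError
import Mathlib
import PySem

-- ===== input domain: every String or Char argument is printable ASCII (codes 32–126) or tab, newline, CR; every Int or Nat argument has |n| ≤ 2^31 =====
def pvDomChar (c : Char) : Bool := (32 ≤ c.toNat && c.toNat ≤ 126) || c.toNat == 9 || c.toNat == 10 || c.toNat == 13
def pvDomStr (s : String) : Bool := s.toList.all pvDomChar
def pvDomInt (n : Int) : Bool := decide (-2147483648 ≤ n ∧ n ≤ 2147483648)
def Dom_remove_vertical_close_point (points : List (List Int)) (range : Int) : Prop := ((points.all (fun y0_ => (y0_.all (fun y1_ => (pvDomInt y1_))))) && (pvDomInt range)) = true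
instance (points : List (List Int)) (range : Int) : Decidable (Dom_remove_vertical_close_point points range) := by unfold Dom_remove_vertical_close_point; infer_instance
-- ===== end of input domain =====

-- B replaces A's rescan of all kept points per candidate with a sorted list of
-- kept y-values + binary search, checking only the two nearest neighbours
-- (alternative algorithm, same result).

-- ===== PORT A =====
def remove_vertical_close_point (points : List (List Int)) (range : Int) : List (List Int) :=
  points.foldl (fun results point =>
    let keep := results.foldl (fun keep result =>
      if |PySem.List.pyGetD point 1 0 - PySem.List.pyGetD result 1 0| < range then false else keep) true
    if keep then results ++ [point] else results) []

-- ===== PORT B =====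
-- hand-written binary search from Source B (_bisect_left), step for step; a[mid] is
-- always in range (0 ≤ lo ≤ mid < hi ≤ len), so getD is exact
def pyBisectLeft (a : List Int) (x : Int) (lo hi : Nat) : Nat :=
  if _h : lo < hi then
    let mid := (lo + hi) / 2
    if a.getD mid 0 < x then pyBisectLeft a x (mid + 1) hi else pyBisectLeft a x lo mid
  else lo
termination_by hi - lo
decreasing_by all_goals simp only [mid] at *; omega

def remove_vertical_close_point_alt (points : List (List Int)) (range : Int) : List (List Int) :=
  (points.foldl (fun (st : List (List Int) × List Int) point =>
    let y := PySem.List.pyGetD point 1 0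
    let ys := st.2
    let i := pyBisectLeft ys y 0 ys.length
    let close := (decide (0 < i) && decide (y - ys.getD (i - 1) 0 < range)) ||
                 (decide (i < ys.length) && decide (ys.getD i 0 - y < range))
    if close then st else (st.1 ++ [point], PySem.List.insert ys (i : Int) y)) ([], [])).1

-- ===== PRECONDITION & SPEC =====
-- Pre_ excludes inputs containing an inner list of fewer than 2 elements: on those
-- Python A raises IndexError whenever a comparison occurs, and on the remaining
-- corner (e.g. a single short point) B's algorithm itself raises where A returns.
def Pre_remove_vertical_close_point (points : List (List Int)) (range : Int) : Prop :=
  ∀ p ∈ points, 2 ≤ p.length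
instance (points : List (List Int)) (range : Int) : Decidable (Pre_remove_vertical_close_point points range) := by unfold Pre_remove_vertical_close_point; infer_instance

def pvWitness_remove_vertical_close_point : List (List Int) × Int := ([[0, 1], [0, 5], [0, 6]], 2)

def Spec_remove_vertical_close_point (points : List (List Int)) (range : Int) (out : List (List Int)) : Prop := out = remove_vertical_close_point_alt points range
instance (points : List (List Int)) (range : Int) (out : List (List Int)) : Decidable (Spec_remove_vertical_close_point points range out) := by unfold Spec_remove_vertical_close_point; infer_instance

-- ===== CLAIM (what is proved, stated in full; the proofs are below) =====
def Claim_equal_remove_vertical_close_point : Prop := ∀ (points : List (List Int)) (range : Int), Dom_remove_vertical_close_point points range → Pre_remove_vertical_close_point points range → Spec_remove_vertical_close_point points range (remove_vertical_close_point points range)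

-- ===== LEMMAS AND PROOFS =====

theorem getD_mono (a : List Int) (hs : a.Pairwise (· ≤ ·)) {j k : Nat}
    (hjk : j ≤ k) (hk : k < a.length) : a.getD j 0 ≤ a.getD k 0 := by
  rcases Nat.lt_or_ge j k with h | h
  · rw [List.getD_eq_getElem a 0 (Nat.lt_of_lt_of_le h (Nat.le_of_lt hk)),
        List.getD_eq_getElem a 0 hk]
    exact List.pairwise_iff_getElem.mp hs j k _ _ h
  · have : j = k := Nat.le_antisymm hjk h
    subst this; rfl

theorem bis_spec_aux (a : List Int) (x : Int) (hs : a.Pairwise (· ≤ ·)) :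
    ∀ n lo hi, hi - lo ≤ n → lo ≤ hi → hi ≤ a.length →
    (∀ k, k < lo → a.getD k 0 < x) →
    (∀ k, hi ≤ k → k < a.length → x ≤ a.getD k 0) →
    pyBisectLeft a x lo hi ≤ hi ∧
    (∀ k, k < pyBisectLeft a x lo hi → a.getD k 0 < x) ∧
    (∀ k, pyBisectLeft a x lo hi ≤ k → k < a.length → x ≤ a.getD k 0) := by
  intro n
  induction n with
  | zero =>
    intro lo hi hn hlo hhi hlow hhigh
    have heq : ¬ lo < hi := by omega
    rw [pyBisectLeft]
    simp only [heq, dif_neg, not_false_iff]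
    exact ⟨hlo, hlow, fun k hk hklen => hhigh k (by omega) hklen⟩
  | succ n ih =>
    intro lo hi hn hlo hhi hlow hhigh
    by_cases hlh : lo < hi
    · rw [pyBisectLeft]
      simp only [hlh, dif_pos]
      by_cases hmx : a.getD ((lo + hi) / 2) 0 < x
      · simp only [hmx, if_pos]
        refine ih ((lo + hi) / 2 + 1) hi (by omega) (by omega) hhi ?_ hhigh
        intro k hk
        rcases Nat.lt_or_ge k lo with h' | h'
        · exact hlow k h'
        · exact Int.lt_of_le_of_lt (getD_mono a hs (show k ≤ (lo + hi) / 2 by omega) (by omega)) hmx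
      · simp only [hmx, if_neg, not_false_iff]
        obtain ⟨h1, h2, h3⟩ := ih lo ((lo + hi) / 2) (by omega) (by omega) (by omega) hlow
          (fun k hk hklen => le_trans (not_lt.mp hmx) (getD_mono a hs hk hklen))
        exact ⟨by omega, h2, h3⟩
    · rw [pyBisectLeft]
      simp only [hlh, dif_neg, not_false_iff]
      exact ⟨hlo, hlow, fun k hk hklen => hhigh k (by omega) hklen⟩

theorem bis_spec (a : List Int) (x : Int) (hs : a.Pairwise (· ≤ ·)) :
    ∀ lo hi, lo ≤ hi → hi ≤ a.length →
    (∀ k, k < lo → a.getD k 0 < x) →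
    (∀ k, hi ≤ k → k < a.length → x ≤ a.getD k 0) →
    pyBisectLeft a x lo hi ≤ hi ∧
    (∀ k, k < pyBisectLeft a x lo hi → a.getD k 0 < x) ∧
    (∀ k, pyBisectLeft a x lo hi ≤ k → k < a.length → x ≤ a.getD k 0) := by
  intro lo hi
  exact bis_spec_aux a x hs (hi - lo) lo hi le_rfl

-- close-check via the two bisect neighbours ↔ some kept y is within range
theorem close_iff (ys : List Int) (hs : ys.Pairwise (· ≤ ·)) (y r : Int) :
    (((decide (0 < pyBisectLeft ys y 0 ys.length) && decide (y - ys.getD (pyBisectLeft ys y 0 ys.length - 1) 0 < r)) ||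
      (decide (pyBisectLeft ys y 0 ys.length < ys.length) && decide (ys.getD (pyBisectLeft ys y 0 ys.length) 0 - y < r))) = true)
    ↔ ∃ y' ∈ ys, |y - y'| < r := by
  obtain ⟨hile, hlt, hge⟩ := bis_spec ys y hs 0 ys.length (Nat.zero_le _) le_rfl
    (by omega) (by omega)
  set i := pyBisectLeft ys y 0 ys.length with hi
  simp only [Bool.or_eq_true, Bool.and_eq_true, decide_eq_true_eq]
  constructor
  · rintro (⟨hpos, hcl⟩ | ⟨hil, hcl⟩)
    · have hk : i - 1 < ys.length := by omega
      refine ⟨ys.getD (i - 1) 0, ?_, ?_⟩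
      · rw [List.getD_eq_getElem ys 0 hk]; exact List.getElem_mem hk
      · have := hlt (i - 1) (by omega)
        rw [abs_of_pos (by omega)]; exact hcl
    · refine ⟨ys.getD i 0, ?_, ?_⟩
      · rw [List.getD_eq_getElem ys 0 hil]; exact List.getElem_mem hil
      · have := hge i le_rfl hil
        rw [abs_of_nonpos (by omega), neg_sub]; exact hcl
  · rintro ⟨y', hmem, hclose⟩
    obtain ⟨k, hk, hky⟩ := List.mem_iff_getElem.mp hmem
    have hky' : ys.getD k 0 = y' := by rw [List.getD_eq_getElem ys 0 hk]; exact hky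
    rcases Nat.lt_or_ge k i with h | h
    · left
      have h1 : ys.getD k 0 < y := hlt k h
      have h2 : ys.getD k 0 ≤ ys.getD (i - 1) 0 := getD_mono ys hs (by omega) (by omega)
      have h3 : ys.getD (i - 1) 0 < y := hlt (i - 1) (by omega)
      have habs : |y - y'| = y - y' := abs_of_pos (by omega)
      exact ⟨by omega, by rw [habs] at hclose; omega⟩
    · right
      have h1 : y ≤ ys.getD k 0 := hge k h hk
      have h2 : ys.getD i 0 ≤ ys.getD k 0 := getD_mono ys hs h hk
      have habs : |y - y'| = y' - y := by rw [abs_sub_comm]; exact abs_of_nonneg (by omega)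
      exact ⟨by omega, by rw [habs] at hclose; omega⟩

-- A's inner loop computes "no kept point is close"
theorem foldl_keep (c : List Int → Bool) (rs : List (List Int)) :
    rs.foldl (fun keep r => if c r then false else keep) true = !rs.any c := by
  have hfalse : ∀ ts : List (List Int),
      ts.foldl (fun keep r => if c r then false else keep) false = false := by
    intro ts; induction ts with
    | nil => rfl
    | cons t ts ih =>
      rw [List.foldl_cons]
      split <;> exact ih
  induction rs with
  | nil => rfl
  | cons r rs ih =>
    rw [List.foldl_cons, List.any_cons]
    split
    case isTrue h => rw [hfalse, h]; rfl
    case isFalse h =>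
      rw [ih]
      have hcr : c r = false := by simpa using h
      rw [hcr]; simp

theorem insert_mem_sorted (ys : List Int) (y : Int) (i : Nat)
    (hile : i ≤ ys.length) (hs : ys.Pairwise (· ≤ ·))
    (hlt : ∀ k, k < i → ys.getD k 0 < y)
    (hge : ∀ k, i ≤ k → k < ys.length → y ≤ ys.getD k 0) :
    (PySem.List.insert ys (i : Int) y).Pairwise (· ≤ ·) ∧
    (∀ z, z ∈ PySem.List.insert ys (i : Int) y ↔ z = y ∨ z ∈ ys) := by
  rw [PySem.List.insert_natCast ys i y hile]
  have htake : ∀ z ∈ ys.take i, z ≤ y := by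
    intro z hz
    obtain ⟨k, hk, hkz⟩ := List.mem_iff_getElem.mp hz
    have hk' : k < i := by
      have := hk; rw [List.length_take] at this; omega
    have hkl : k < ys.length := by omega
    have : ys.getD k 0 < y := hlt k hk'
    rw [List.getD_eq_getElem ys 0 hkl] at this
    rw [← hkz, List.getElem_take]
    omega
  have hdrop : ∀ z ∈ ys.drop i, y ≤ z := by
    intro z hz
    obtain ⟨k, hk, hkz⟩ := List.mem_iff_getElem.mp hz
    have hkl : i + k < ys.length := by
      have := hk; rw [List.length_drop] at this; omega
    have : y ≤ ys.getD (i + k) 0 := hge (i + k) (by omega) hkl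
    rw [List.getD_eq_getElem ys 0 hkl] at this
    rw [← hkz, List.getElem_drop]
    exact this
  constructor
  · rw [List.pairwise_append]
    refine ⟨hs.sublist (List.take_sublist i ys), ?_, ?_⟩
    · rw [List.pairwise_cons]
      exact ⟨hdrop, hs.sublist (List.drop_sublist i ys)⟩
    · intro z hz w hw
      rcases List.mem_cons.mp hw with h | h
      · subst h; exact htake z hz
      · exact le_trans (htake z hz) (hdrop w h)
  · intro z
    constructor
    · intro hz
      rcases List.mem_append.mp hz with h | h
      · right; exact List.mem_of_mem_take h
      · rcases List.mem_cons.mp h with h | h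
        · left; exact h
        · right; exact List.mem_of_mem_drop h
    · intro hz
      rcases hz with h | h
      · subst h; exact List.mem_append.mpr (Or.inr (List.mem_cons_self))
      · rw [← List.take_append_drop i ys] at h
        rcases List.mem_append.mp h with h | h
        · exact List.mem_append.mpr (Or.inl h)
        · exact List.mem_append.mpr (Or.inr (List.mem_cons_of_mem _ h))

theorem loop_eq (range : Int) :
    ∀ (points : List (List Int)) (results : List (List Int)) (ys : List Int),
    ys.Pairwise (· ≤ ·) →
    (∀ z, z ∈ ys ↔ ∃ p ∈ results, PySem.List.pyGetD p 1 0 = z) →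
    points.foldl (fun results point =>
      let keep := results.foldl (fun keep result =>
        if |PySem.List.pyGetD point 1 0 - PySem.List.pyGetD result 1 0| < range then false else keep) true
      if keep then results ++ [point] else results) results =
    (points.foldl (fun (st : List (List Int) × List Int) point =>
      let y := PySem.List.pyGetD point 1 0
      let ys := st.2
      let i := pyBisectLeft ys y 0 ys.length
      let close := (decide (0 < i) && decide (y - ys.getD (i - 1) 0 < range)) ||
                   (decide (i < ys.length) && decide (ys.getD i 0 - y < range))
      if close then st else (st.1 ++ [point], PySem.List.insert ys (i : Int) y)) (results, ys)).1 := by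
  intro points
  induction points with
  | nil => intro results ys _ _; rfl
  | cons point ps ih =>
    intro results ys hs hinv
    simp only [List.foldl_cons]
    set y := PySem.List.pyGetD point 1 0 with hy
    have hkeep := foldl_keep (fun r => decide (|y - PySem.List.pyGetD r 1 0| < range)) results
    have hclose : (((decide (0 < pyBisectLeft ys y 0 ys.length) && decide (y - ys.getD (pyBisectLeft ys y 0 ys.length - 1) 0 < range)) ||
        (decide (pyBisectLeft ys y 0 ys.length < ys.length) && decide (ys.getD (pyBisectLeft ys y 0 ys.length) 0 - y < range))) = true)
        ↔ (results.any (fun r => decide (|y - PySem.List.pyGetD r 1 0| < range)) = true) := by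
      rw [close_iff ys hs y range]
      simp only [List.any_eq_true, decide_eq_true_eq]
      constructor
      · rintro ⟨y', hmem, hcl⟩
        obtain ⟨p, hp, hpy⟩ := (hinv y').mp hmem
        exact ⟨p, hp, by rw [hpy]; exact hcl⟩
      · rintro ⟨p, hp, hcl⟩
        exact ⟨PySem.List.pyGetD p 1 0, (hinv _).mpr ⟨p, hp, rfl⟩, hcl⟩
    obtain ⟨hile, hlt, hge⟩ := bis_spec ys y hs 0 ys.length (Nat.zero_le _) le_rfl
      (by omega) (by omega)
    by_cases hc : (results.any (fun r => decide (|y - PySem.List.pyGetD r 1 0| < range)) = true)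
    · -- close: both sides skip the point
      have h1 : (results.foldl (fun keep result =>
          if |y - PySem.List.pyGetD result 1 0| < range then false else keep) true) = false := by
        rw [show (fun (keep : Bool) result =>
            if |y - PySem.List.pyGetD result 1 0| < range then false else keep) =
            (fun (keep : Bool) r => if decide (|y - PySem.List.pyGetD r 1 0| < range) = true then false else keep) by
          funext keep r; simp]
        rw [hkeep, hc]; rfl
      simp only [h1, if_neg, Bool.false_eq_true, not_false_iff, hclose.mpr hc, if_pos]
      exact ih results ys hs hinv
    · -- keep: both sides append the point
      have h1 : (results.foldl (fun keep result =>
          if |y - PySem.List.pyGetD result 1 0| < range then false else keep) true) = true := by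
        rw [show (fun (keep : Bool) result =>
            if |y - PySem.List.pyGetD result 1 0| < range then false else keep) =
            (fun (keep : Bool) r => if decide (|y - PySem.List.pyGetD r 1 0| < range) = true then false else keep) by
          funext keep r; simp]
        rw [hkeep]
        simp only [Bool.not_eq_true'] at *
        simp [hc]
      have hcB : ¬ (((decide (0 < pyBisectLeft ys y 0 ys.length) && decide (y - ys.getD (pyBisectLeft ys y 0 ys.length - 1) 0 < range)) ||
          (decide (pyBisectLeft ys y 0 ys.length < ys.length) && decide (ys.getD (pyBisectLeft ys y 0 ys.length) 0 - y < range))) = true) := by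
        intro h; exact hc (hclose.mp h)
      obtain ⟨hsort', hmem'⟩ := insert_mem_sorted ys y (pyBisectLeft ys y 0 ys.length) hile hs hlt hge
      simp only [h1, if_pos, hcB, if_neg]
      refine ih (results ++ [point]) _ hsort' ?_
      intro z
      rw [hmem' z, hinv z]
      constructor
      · rintro (h | ⟨p, hp, hpz⟩)
        · exact ⟨point, List.mem_append.mpr (Or.inr List.mem_cons_self), h.symm⟩
        · exact ⟨p, List.mem_append.mpr (Or.inl hp), hpz⟩
      · rintro ⟨p, hp, hpz⟩
        rcases List.mem_append.mp hp with h | h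
        · exact Or.inr ⟨p, h, hpz⟩
        · rcases List.mem_cons.mp h with h | h
          · subst h; exact Or.inl hpz.symm
          · exact absurd h (List.not_mem_nil)

-- ===== VERDICT (by name: the statement is the Claim_ definition above) =====
theorem remove_vertical_close_point_spec : Claim_equal_remove_vertical_close_point := by
  intro points range _ _
  unfold Spec_remove_vertical_close_point remove_vertical_close_point remove_vertical_close_point_alt
  exact loop_eq range points [] [] List.Pairwise.nil (by simp)
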